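-- pv_equiv track=rewrite | github.com/chuongnvk54/RECOGNIZE_ID_CARD | tools/process_text.py | score_conghoa
-- ===== SOURCE A (Python) =====
-- def score_conghoa(key):
--     s = 0
--     for i in {'CO', 'ON', 'NG', 'G ', ' H', 'HO', 'OA', 'A ','XA', 'A ', ' H',
--         'HO', 'OI', 'I ', ' C', 'CH', 'HU', 'U ', ' N', 'NG', 'GH', 'HI', 'IA',
--         'A ', ' V', 'VI', 'IE', 'ET', 'T ', ' N', 'NA', 'AM'}:
--         if key.find(i) != -1:
--             s = s+1
--     return s
-- ===== SOURCE B (Python) =====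
-- _TARGETS = {'CO', 'ON', 'NG', 'G ', ' H', 'HO', 'OA', 'A ', 'XA', 'A ', ' H',
--     'HO', 'OI', 'I ', ' C', 'CH', 'HU', 'U ', ' N', 'NG', 'GH', 'HI', 'IA',
--     'A ', ' V', 'VI', 'IE', 'ET', 'T ', ' N', 'NA', 'AM'}
--
--
-- def score_conghoa(key):
--     pairs = {key[i:i + 2] for i in range(len(key) - 1)}
--     return len(_TARGETS & pairs)
-- ===== Notes on version B (the rewrite author's own statement) =====
-- stated objective: idiomatic
-- what changed: Instead of scanning key once per target bigram with find, B builds the set of key's consecutive bigrams once and returns the size of its intersection with the constant target set.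
import Mathlib
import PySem

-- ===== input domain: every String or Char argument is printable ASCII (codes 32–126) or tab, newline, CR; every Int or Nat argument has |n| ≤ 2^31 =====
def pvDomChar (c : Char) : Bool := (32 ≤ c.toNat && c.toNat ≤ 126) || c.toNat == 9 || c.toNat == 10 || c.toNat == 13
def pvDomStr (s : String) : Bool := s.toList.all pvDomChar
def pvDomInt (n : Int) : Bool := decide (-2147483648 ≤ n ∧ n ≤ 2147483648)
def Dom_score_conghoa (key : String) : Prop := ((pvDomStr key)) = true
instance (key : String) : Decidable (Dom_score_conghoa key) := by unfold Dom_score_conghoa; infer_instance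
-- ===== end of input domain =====

-- B replaces the per-target substring scans by building the set of key's bigrams once and
-- intersecting it with the constant target set (objective: idiomatic; same observable count).

-- ===== PORT A =====
-- A iterates over a Python set literal; its hash-order is not modelled, but the computed
-- count is order-independent, so the port folds over the distinct elements in
-- first-occurrence order of the literal.
def pvTargetsA : List String :=
  ["CO", "ON", "NG", "G ", " H", "HO", "OA", "A ", "XA", "OI", "I ", " C", "CH",
   "HU", "U ", " N", "GH", "HI", "IA", " V", "VI", "IE", "ET", "T ", "NA", "AM"]

def score_conghoa (key : String) : Int :=
  pvTargetsA.foldl (fun s i => if PySem.Str.find key i ≠ -1 then s + 1 else s) 0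

-- ===== PORT B =====
-- the set literal of Source B, duplicates and all
def pvTargetsB : PySem.Set String :=
  PySem.Set.ofList
    ["CO", "ON", "NG", "G ", " H", "HO", "OA", "A ", "XA", "A ", " H",
     "HO", "OI", "I ", " C", "CH", "HU", "U ", " N", "NG", "GH", "HI", "IA",
     "A ", " V", "VI", "IE", "ET", "T ", " N", "NA", "AM"]

-- pairs = {key[i:i+2] for i in range(len(key)-1)}
def pvPairs (key : String) : PySem.Set String :=
  PySem.Set.ofList
    ((PySem.List.pyRange 0 (PySem.Str.len key - 1) 1).map
      (fun i => PySem.Str.slice key (some i) (some (i + 2))))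

def score_conghoa_alt (key : String) : Int :=
  PySem.Set.len (PySem.Set.inter pvTargetsB (pvPairs key))

-- ===== PRECONDITION & SPEC =====
def Spec_score_conghoa (key : String) (out : Int) : Prop := out = score_conghoa_alt key
instance (key : String) (out : Int) : Decidable (Spec_score_conghoa key out) := by unfold Spec_score_conghoa; infer_instance

-- ===== CLAIM (what is proved, stated in full; the proofs are below) =====
def Claim_equal_score_conghoa : Prop := ∀ (key : String), Dom_score_conghoa key → Spec_score_conghoa key (score_conghoa key)

-- ===== LEMMAS AND PROOFS =====

-- the duplicate-laden set literal of Source B collapses to A's distinct target list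
lemma targetsB_eq : (pvTargetsB : List String) = pvTargetsA := by decide

-- a length-2 string is an infix of key iff it is one of key's bigram slices
lemma infix_iff_bigram (key t : String) (h2 : t.toList.length = 2) :
    t.toList <:+: key.toList ↔
      ∃ i : Int, (0 ≤ i ∧ i < (key.toList.length : Int) - 1) ∧
        PySem.Str.slice key (some i) (some (i + 2)) = t := by
  constructor
  · rintro ⟨u, v, huv⟩
    refine ⟨(u.length : Int), ⟨by positivity, ?_⟩, ?_⟩
    · have : key.toList.length = u.length + 2 + v.length := by
        rw [← huv]; simp [h2]; omega
      omega
    · rw [← String.toList_inj, PySem.Str.toList_slice, PySem.Chars.slice_eq_listSlice]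
      have h := PySem.List.slice_natCast_add key.toList u.length 2
      push_cast at h
      rw [h, ← huv]
      simp [h2]
  · rintro ⟨i, ⟨hi0, _⟩, hsl⟩
    obtain ⟨j, rfl⟩ : ∃ j : Nat, i = (j : Int) := ⟨i.toNat, (Int.toNat_of_nonneg hi0).symm⟩
    rw [← String.toList_inj, PySem.Str.toList_slice, PySem.Chars.slice_eq_listSlice] at hsl
    have h := PySem.List.slice_natCast_add key.toList j 2
    push_cast at h
    rw [h] at hsl
    have hpre : t.toList <+: key.toList.drop j := by
      rw [← hsl]; exact List.take_prefix _ _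
    obtain ⟨w, hw⟩ := hpre
    exact ⟨key.toList.take j, w, by rw [List.append_assoc, hw, List.take_append_drop]⟩

-- for each length-2 target, A's membership test agrees with membership in B's bigram set
lemma test_agree (key t : String) (h2 : t.toList.length = 2) :
    (decide (PySem.Str.find key t ≠ -1)) = (pvPairs key).contains t := by
  rw [Bool.eq_iff_iff, decide_eq_true_iff, PySem.Set.contains_iff,
    PySem.Str.find_ne_neg_one_iff, infix_iff_bigram key t h2]
  unfold pvPairs
  rw [PySem.Set.mem_ofList, List.mem_map]
  constructor
  · rintro ⟨i, hb, hsl⟩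
    exact ⟨i, by rw [PySem.List.mem_pyRange_one]; simp [PySem.Str.len_eq] at *; omega, hsl⟩
  · rintro ⟨i, hb, hsl⟩
    rw [PySem.List.mem_pyRange_one] at hb
    exact ⟨i, by simp [PySem.Str.len_eq] at *; omega, hsl⟩

-- ===== VERDICT (by name: the statement is the Claim_ definition above) =====
theorem score_conghoa_spec : Claim_equal_score_conghoa := by
  intro key _
  unfold Spec_score_conghoa score_conghoa score_conghoa_alt
  rw [PySem.List.foldl_ite_add_one]
  unfold PySem.Set.len PySem.Set.inter
  rw [targetsB_eq, ← List.countP_eq_length_filter]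
  have hc : List.countP (fun x => decide (PySem.Str.find key x ≠ -1)) pvTargetsA
      = List.countP (fun x => (pvPairs key).contains x) pvTargetsA := by
    apply List.countP_congr
    intro t ht
    have h2 : t.toList.length = 2 := by fin_cases ht <;> decide
    rw [test_agree key t h2]
  rw [hc]; ring
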